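-- pv_equiv track=rewrite | github.com/Al252/Beginner-Programmes | Python/Practice/course_list.py | t_func
-- ===== SOURCE A (Python) =====
-- def t_func(each, key):
--     each = each.split(' ')
--     index = 0
--     time = []
--     t_str = ''
--     for word in each:
--         if word == key:
--             time = each[index + 1:index + 4]
--         index += 1
--     if time:
--         for digit in time:
--             t_str += ' ' + digit
--         return t_str
-- ===== SOURCE B (Python) =====
-- def t_func(each, key):
--     words = each.split(' ')
--     tail = []
--     for i in range(len(words) - 1, -1, -1):
--         if words[i] == key:
--             tail = words[i + 1:i + 4]
--             break
--     if tail: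
--         return ' ' + ' '.join(tail)
-- ===== Notes on version B (the rewrite author's own statement) =====
-- stated objective: simpler
-- what changed: Replaces the forward full scan that keeps overwriting the slice after every match (plus a manual index counter and a character-concatenation loop) with a reverse index scan that breaks at the last occurrence and returns ' ' + ' '.join(tail).
import Mathlib
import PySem

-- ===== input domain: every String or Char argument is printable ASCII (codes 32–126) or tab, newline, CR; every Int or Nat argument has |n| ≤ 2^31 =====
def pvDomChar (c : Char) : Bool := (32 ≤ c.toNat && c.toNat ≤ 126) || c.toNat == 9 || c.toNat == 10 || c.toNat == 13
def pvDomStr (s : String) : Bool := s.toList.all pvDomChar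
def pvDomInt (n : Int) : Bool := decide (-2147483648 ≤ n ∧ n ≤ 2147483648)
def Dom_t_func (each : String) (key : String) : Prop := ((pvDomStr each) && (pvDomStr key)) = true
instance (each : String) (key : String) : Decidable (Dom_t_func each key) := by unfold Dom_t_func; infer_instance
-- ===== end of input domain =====

-- B replaces A's forward overwrite-on-every-match scan with a reverse scan that stops at the
-- last occurrence and joins the tail; objective: simpler.

-- ===== PORT A =====
-- each.split(' ') is PySem.Str.split? with the nonempty separator " " (never none, so getD [] is exact);
-- t_str += ' ' + digit is ported on code points (String concatenation element-for-element, exact).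
def t_func (each : String) (key : String) : Option String :=
  let ws := (PySem.Str.split? each " ").getD []
  let st := ws.foldl
    (fun (st : Int × List String) word =>
      (st.1 + 1,
       if word == key then PySem.List.slice ws (some (st.1 + 1)) (some (st.1 + 4)) else st.2))
    ((0 : Int), ([] : List String))
  if st.2 = [] then none
  else
    some (String.ofList (st.2.foldl (fun acc digit => acc ++ (' ' :: digit.toList)) []))

-- ===== PORT B =====
-- reverse loop 'for i in range(len(words)-1, -1, -1): … break' — structural countdown on the
-- index: argument n+1 examines index n first (= the loop's current i), recursing = continuing;
-- words[i] is always in range here, so getD is exact.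
def altScan (ws : List String) (key : String) : Nat → List String
  | 0 => []
  | n + 1 =>
      if ws.getD n "" == key then
        PySem.List.slice ws (some ((n : Int) + 1)) (some ((n : Int) + 4))
      else altScan ws key n

def t_func_alt (each : String) (key : String) : Option String :=
  let ws := (PySem.Str.split? each " ").getD []
  let tail := altScan ws key ws.length
  if tail = [] then none
  else some (String.ofList (' ' :: (PySem.Str.join " " tail).toList))

-- ===== PRECONDITION & SPEC =====
def Spec_t_func (each : String) (key : String) (out : Option String) : Prop := out = t_func_alt each key
instance (each : String) (key : String) (out : Option String) : Decidable (Spec_t_func each key out) := by unfold Spec_t_func; infer_instance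

-- ===== CLAIM (what is proved, stated in full; the proofs are below) =====
def Claim_equal_t_func : Prop := ∀ (each : String) (key : String), Dom_t_func each key → Spec_t_func each key (t_func each key)

-- ===== LEMMAS AND PROOFS =====

-- A's forward fold over the first n words equals B's countdown scan of the first n indices.
theorem scan_eq (ws : List String) (key : String) : ∀ n, n ≤ ws.length →
    (ws.take n).foldl
      (fun (st : Int × List String) word =>
        (st.1 + 1,
         if word == key then PySem.List.slice ws (some (st.1 + 1)) (some (st.1 + 4)) else st.2))
      ((0 : Int), ([] : List String))
    = ((n : Int), altScan ws key n) := by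
  intro n
  induction n with
  | zero => intro _; simp [altScan]
  | succ n ih =>
    intro h
    have hn : n < ws.length := by omega
    rw [List.take_add_one, List.getElem?_eq_getElem hn]
    simp only [Option.toList_some, List.foldl_append, ih (by omega), List.foldl_cons,
      List.foldl_nil, altScan, List.getD_eq_getElem?_getD, List.getElem?_eq_getElem hn,
      Option.getD_some]
    split <;> simp

-- A's concatenation loop flattens to ' '-prefixed chunks.
theorem concat_loop (t : List String) (acc : List Char) :
    t.foldl (fun acc digit => acc ++ (' ' :: digit.toList)) acc
      = acc ++ t.flatMap (fun d => ' ' :: d.toList) := by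
  induction t generalizing acc with
  | nil => simp
  | cons d t ih => simp [ih, List.flatMap_cons]

-- ' ' + ' '.join(t) is the same chunk list, for nonempty t.
theorem join_chunks (t : List String) (ht : t ≠ []) :
    ' ' :: PySem.Chars.join [' '] (t.map String.toList)
      = t.flatMap (fun d => ' ' :: d.toList) := by
  induction t with
  | nil => exact absurd rfl ht
  | cons d t ih =>
    cases t with
    | nil => simp [PySem.Chars.join_singleton]
    | cons e t =>
      rw [List.map_cons, List.map_cons, PySem.Chars.join_cons_cons]
      have := ih (by simp)
      rw [List.map_cons] at this
      rw [List.flatMap_cons, ← this]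
      simp

-- ===== VERDICT (by name: the statement is the Claim_ definition above) =====
theorem t_func_spec : Claim_equal_t_func := by
  intro each key _
  simp only [Spec_t_func, t_func, t_func_alt]
  generalize (PySem.Str.split? each " ").getD [] = ws
  have h := scan_eq ws key ws.length le_rfl
  rw [List.take_length] at h
  rw [h]
  by_cases he : altScan ws key ws.length = []
  · simp [he]
  · simp only [he, if_false]
    congr 1
    rw [concat_loop, PySem.Str.toList_join,
      show (" " : String).toList = [' '] from rfl, join_chunks _ he]
    simp
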